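-- pv_equiv track=rewrite | github.com/human02/Interview-Preparation | random_ques/unbiased.py | minOperationsToUnbias
-- ===== SOURCE A (Python) =====
-- def minOperationsToUnbias(n: int, data1: str, data2: str) -> int:
--     """
--         edge cases:
--             1. n == 0 -> return 0
--             2. strings with all 0s or all 1s -> handled by general logic (may end up dropping many)
--         algo:
--             1. build prefix sums of '1's for both strings so we can ask
--                ones(data1[:k]) and ones(data2[:k]) in O(1)
--             2. define for dropping i from RIGHT of data1:
--                    a(i) = 2 * ones(data1[:n-i]) + i
--                keep the smallest i that gives each a(i) in a hashmap
--             3. sweep j from 0..n for LEFT drops on data2: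
--                    b(j) = 2 * ones(data2[j:]) + j
--                to be unbiased, we need a(i) + b(j) == 2n  ==> look up need = 2n - b(j)
--             4. track min (i + j) across all matches and return it
--         t.c - O(n)  (one pass to build prefix, one pass to build map, one pass to sweep j)
--         s.c - O(n)  (prefix arrays + hashmap for a(i))
--     """
--     # prefix counts of ones
--     p1 = [0] * (n + 1)
--     p2 = [0] * (n + 1)
--     for i in range(n):
--         p1[i + 1] = p1[i] + (data1[i] == '1')
--         p2[i + 1] = p2[i] + (data2[i] == '1')
--
--     ones2_total = p2[n]
--
--     best_for_a = {}
--     for i in range(0, n + 1):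
--         ones_after_i = p1[n - i]
--         a = 2 * ones_after_i + i
--         if a not in best_for_a or i < best_for_a[a]:
--             best_for_a[a] = i
--
--     ans = 2 * n
--     for j in range(0, n + 1):
--         ones2_after_j = ones2_total - p2[j]
--         b = 2 * ones2_after_j + j
--         need = 2 * n - b
--         if need in best_for_a:
--             i = best_for_a[need]
--             if i + j < ans:
--                 ans = i + j
--
--     return ans
-- ===== SOURCE B (Python) =====
-- def minOperationsToUnbias(n: int, data1: str, data2: str) -> int:
--     # materialize the first n one-bits of each string, then brute-force all drop pairs
--     ones1 = [data1[k] == '1' for k in range(n)]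
--     ones2 = [data2[k] == '1' for k in range(n)]
--     ans = 2 * n
--     for i in range(n + 1):
--         a = 2 * sum(ones1[:n - i]) + i
--         for j in range(n + 1):
--             b = 2 * sum(ones2[j:]) + j
--             if a + b == 2 * n and i + j < ans:
--                 ans = i + j
--     return ans
-- ===== Notes on version B (the rewrite author's own statement) =====
-- stated objective: simpler
-- what changed: Replaced the prefix-sum arrays plus min-index hashmap and lookup sweep by a direct brute force: for every pair (i,j) of drop counts compute a(i)+b(j) from slice counts and keep the smallest i+j with a(i)+b(j)==2n.
import Mathlib
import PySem

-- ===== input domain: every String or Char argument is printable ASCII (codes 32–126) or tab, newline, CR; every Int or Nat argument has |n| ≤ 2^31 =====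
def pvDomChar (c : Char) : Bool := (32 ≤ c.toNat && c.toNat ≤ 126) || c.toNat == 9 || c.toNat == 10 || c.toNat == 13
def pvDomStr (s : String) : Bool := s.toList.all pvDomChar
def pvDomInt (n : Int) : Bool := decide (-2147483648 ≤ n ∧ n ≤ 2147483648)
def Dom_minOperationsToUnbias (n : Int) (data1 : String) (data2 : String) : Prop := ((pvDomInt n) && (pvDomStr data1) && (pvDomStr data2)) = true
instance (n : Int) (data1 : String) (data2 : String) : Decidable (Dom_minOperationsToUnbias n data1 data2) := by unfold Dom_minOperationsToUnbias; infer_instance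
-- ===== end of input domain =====

-- B replaces A's prefix-sum arrays + min-index hashmap by a direct brute force over all
-- drop-count pairs (i, j); same return value, simpler code (and slower: cubic vs linear).


-- ===== PORT A =====
-- loop 1: p1 = [0]*(n+1); p2 = [0]*(n+1); for i in range(n): p1[i+1] = p1[i] + (data1[i]=='1'); p2[i+1] = …
def pvLoop1 (data1 data2 : String) (n : Int) : List Int × List Int :=
  (PySem.List.pyRange 0 n 1).foldl
    (fun (pq : List Int × List Int) i =>
      (PySem.List.pySetD pq.1 (i + 1)
         (PySem.List.pyGetD pq.1 i 0 + (if PySem.Str.pyGet? data1 i = some '1' then 1 else 0)),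
       PySem.List.pySetD pq.2 (i + 1)
         (PySem.List.pyGetD pq.2 i 0 + (if PySem.Str.pyGet? data2 i = some '1' then 1 else 0))))
    (List.replicate (n + 1).toNat (0 : Int), List.replicate (n + 1).toNat (0 : Int))

-- loop 2: best_for_a = {}; for i in range(0, n+1): a = 2*p1[n-i] + i; if a not in … or i < …: best_for_a[a] = i
def pvLoop2 (n : Int) (p1 : List Int) : PySem.Dict Int Int :=
  (PySem.List.pyRange 0 (n + 1) 1).foldl
    (fun (d : PySem.Dict Int Int) i =>
      let a := 2 * PySem.List.pyGetD p1 (n - i) 0 + i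
      if ¬ (d.contains a = true) ∨ i < d.getD a 0 then d.insert a i else d)
    PySem.Dict.empty

-- loop 3: ans = 2*n; for j in range(0, n+1): b = …; need = 2*n - b; if need in best_for_a: …
def pvLoop3 (n : Int) (ones2_total : Int) (p2 : List Int) (best : PySem.Dict Int Int) : Int :=
  (PySem.List.pyRange 0 (n + 1) 1).foldl
    (fun ans j =>
      let b := 2 * (ones2_total - PySem.List.pyGetD p2 j 0) + j
      let need := 2 * n - b
      match best.get? need with
      | some i => if i + j < ans then i + j else ans
      | none => ans)
    (2 * n)

def minOperationsToUnbias (n : Int) (data1 : String) (data2 : String) : Int :=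
  let pp := pvLoop1 data1 data2 n
  let p1 := pp.1
  let p2 := pp.2
  let ones2_total := PySem.List.pyGetD p2 n 0
  let best := pvLoop2 n p1
  pvLoop3 n ones2_total p2 best

-- ===== PORT B =====
def minOperationsToUnbias_alt (n : Int) (data1 : String) (data2 : String) : Int :=
  let ones1 : List Int := (PySem.List.pyRange 0 n 1).map
    (fun k => if PySem.Str.pyGet? data1 k = some '1' then 1 else 0)
  let ones2 : List Int := (PySem.List.pyRange 0 n 1).map
    (fun k => if PySem.Str.pyGet? data2 k = some '1' then 1 else 0)
  (PySem.List.pyRange 0 (n + 1) 1).foldl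
    (fun ans i =>
      let a := 2 * (PySem.List.slice ones1 none (some (n - i))).sum + i
      (PySem.List.pyRange 0 (n + 1) 1).foldl
        (fun ans j =>
          let b := 2 * (PySem.List.slice ones2 (some j) none).sum + j
          if a + b = 2 * n ∧ i + j < ans then i + j else ans)
        ans)
    (2 * n)

-- ===== PRECONDITION & SPEC =====
-- Pre_ excludes exactly the inputs where A raises IndexError: n < 0, or n beyond either string's length.
def Pre_minOperationsToUnbias (n : Int) (data1 : String) (data2 : String) : Prop :=
  0 ≤ n ∧ n ≤ PySem.Str.len data1 ∧ n ≤ PySem.Str.len data2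
instance (n : Int) (data1 : String) (data2 : String) : Decidable (Pre_minOperationsToUnbias n data1 data2) := by unfold Pre_minOperationsToUnbias; infer_instance
def pvWitness_minOperationsToUnbias : Int × String × String := (2, "10", "01")

def Spec_minOperationsToUnbias (n : Int) (data1 : String) (data2 : String) (out : Int) : Prop := out = minOperationsToUnbias_alt n data1 data2
instance (n : Int) (data1 : String) (data2 : String) (out : Int) : Decidable (Spec_minOperationsToUnbias n data1 data2 out) := by unfold Spec_minOperationsToUnbias; infer_instance

-- ===== CLAIM (what is proved, stated in full; the proofs are below) =====
def Claim_equal_minOperationsToUnbias : Prop := ∀ (n : Int) (data1 : String) (data2 : String), Dom_minOperationsToUnbias n data1 data2 → Pre_minOperationsToUnbias n data1 data2 → Spec_minOperationsToUnbias n data1 data2 (minOperationsToUnbias n data1 data2)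

-- ===== LEMMAS AND PROOFS =====

-- number of '1's among the first k characters
def pvOnes (s : List Char) (k : Nat) : Int := ((s.take k).count '1' : Int)
-- a(i) = 2*ones(data1[:n-i]) + i
def pvAval (s : List Char) (n i : Int) : Int := 2 * pvOnes s (n - i).toNat + i
-- b(j) = 2*ones(data2[j:n]) + j
def pvBval (s : List Char) (n j : Int) : Int := 2 * (pvOnes s n.toNat - pvOnes s j.toNat) + j
-- first i in range(0, n+1) with a(i) = v (= what A's hashmap stores at v)
def pvFirst (s : List Char) (n v : Int) : Option Int :=
  ((PySem.List.pyRange 0 (n + 1) 1).filter (fun i => pvAval s n i == v)).head?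
-- one iteration of A's prefix-sum loop, for one of the two lists
def pvStep (s : String) (p : List Int) (i : Int) : List Int :=
  PySem.List.pySetD p (i + 1)
    (PySem.List.pyGetD p i 0 + (if PySem.Str.pyGet? s i = some '1' then 1 else 0))
lemma pv_ones_succ (s : List Char) (m : Nat) (hm : m < s.length) :
    pvOnes s (m + 1) = pvOnes s m + (if s[m] = '1' then 1 else 0) := by
  unfold pvOnes
  rw [List.take_add_one, List.count_append]
  have : s[m]? = some s[m] := List.getElem?_eq_getElem hm
  rw [this]
  by_cases h : s[m] = '1' <;> simp [h]


lemma pv_prefix (s : String) (N : Nat) (hN : (N : Int) ≤ PySem.Str.len s) :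
    ∀ m : Nat, m ≤ N →
      ((PySem.List.pyRange 0 (m : Int) 1).foldl (pvStep s) (List.replicate (N + 1) (0 : Int))).length = N + 1 ∧
      ∀ k : Nat, k ≤ m →
        PySem.List.pyGetD ((PySem.List.pyRange 0 (m : Int) 1).foldl (pvStep s) (List.replicate (N + 1) (0 : Int))) (k : Int) 0
          = pvOnes s.toList k := by
  have hlen : s.toList.length = PySem.Str.len s := by simp [PySem.Str.len_eq]
  intro m
  induction m with
  | zero =>
    intro _
    constructor
    · simp
    · intro k hk
      interval_cases k
      simp [pvOnes, pysem]
  | succ m ih =>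
    intro hm
    have hm' : m ≤ N := by omega
    obtain ⟨ihlen, ihget⟩ := ih hm'
    have hsplit : PySem.List.pyRange 0 ((m + 1 : Nat) : Int) 1
        = PySem.List.pyRange 0 (m : Int) 1 ++ [(m : Int)] := by
      push_cast
      exact PySem.List.pyRange_one_succ_right (by positivity)
    rw [hsplit, List.foldl_append]
    set r := (PySem.List.pyRange 0 (m : Int) 1).foldl (pvStep s) (List.replicate (N + 1) (0 : Int)) with hr
    simp only [List.foldl_cons, List.foldl_nil]
    have hmlt : m < s.toList.length := by omega
    have hget : PySem.Str.pyGet? s (m : Int) = some s.toList[m] := by simp [PySem.Str.pyGet?]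
    have hstep : pvStep s r (m : Int) = PySem.List.pySetD r ((m : Int) + 1)
        (pvOnes s.toList m + (if s.toList[m] = '1' then 1 else 0)) := by
      unfold pvStep
      rw [ihget m le_rfl, hget]
      congr 1
      by_cases h : s.toList[m] = '1' <;> simp [h]
    rw [hstep]
    have hcast : ((m : Int) + 1) = (((m + 1 : Nat)) : Int) := by push_cast; ring
    constructor
    · rw [hcast]; rw [PySem.List.pySetD_natCast]; simp [ihlen]
    · intro k hk
      rw [hcast, PySem.List.pyGetD_pySetD_natCast r (m+1) k _ 0 (by omega)]
      by_cases hke : k = m + 1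
      · rw [if_pos hke, hke, pv_ones_succ s.toList m hmlt]
      · rw [if_neg hke, ihget k (by omega)]

-- dict loop: get? v is the first index i in range(0, m) with A i = v
lemma pv_dict_get? (A : Int → Int) :
    ∀ (t : Nat) (v : Int),
      (((PySem.List.pyRange 0 (t : Int) 1).foldl
          (fun (d : PySem.Dict Int Int) i =>
            if ¬ (d.contains (A i) = true) ∨ i < d.getD (A i) 0 then d.insert (A i) i else d)
          PySem.Dict.empty).get? v)
        = ((PySem.List.pyRange 0 (t : Int) 1).filter (fun i => A i == v)).head? := by
  intro t
  induction t with
  | zero => intro v; simp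
  | succ t ih =>
    intro v
    have hsplit : PySem.List.pyRange 0 ((t + 1 : Nat) : Int) 1
        = PySem.List.pyRange 0 (t : Int) 1 ++ [(t : Int)] := by
      push_cast
      exact PySem.List.pyRange_one_succ_right (by positivity)
    rw [hsplit, List.foldl_append, List.filter_append]
    set d := (PySem.List.pyRange 0 (t : Int) 1).foldl
          (fun (d : PySem.Dict Int Int) i =>
            if ¬ (d.contains (A i) = true) ∨ i < d.getD (A i) 0 then d.insert (A i) i else d)
          PySem.Dict.empty with hd
    simp only [List.foldl_cons, List.foldl_nil]
    by_cases hc : d.contains (A (t : Int)) = true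
    · -- key already present, with a value < t: no update
      have hsome : ∃ i0, d.get? (A (t : Int)) = some i0 := by
        rcases Option.isSome_iff_exists.mp (by rw [← PySem.Dict.contains_eq_isSome_get? d (A (t:Int))]; exact hc) with ⟨i0, h0⟩
        exact ⟨i0, h0⟩
      obtain ⟨i0, h0⟩ := hsome
      have hmem : i0 ∈ (PySem.List.pyRange 0 (t : Int) 1).filter (fun i => A i == A (t : Int)) := by
        have := ih (A (t : Int))
        rw [h0] at this
        exact List.mem_of_mem_head? (by rw [← this]; rfl)
      have hi0lt : i0 < (t : Int) := by
        have := (PySem.List.mem_pyRange_one).mp (List.mem_of_mem_filter hmem)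
        omega
      have hgetD : d.getD (A (t : Int)) 0 = i0 := PySem.Dict.getD_of_get?_eq_some d 0 h0
      rw [if_neg (by rw [not_or]; exact ⟨by simpa using hc, by rw [hgetD]; omega⟩)]
      rw [ih v]
      by_cases hv : A (t : Int) = v
      · -- filter at v is nonempty: appending [t] does not change head?
        have hne : (PySem.List.pyRange 0 (t : Int) 1).filter (fun i => A i == v) ≠ [] := by
          rw [← hv]
          exact List.ne_nil_of_mem hmem
        rcases List.exists_cons_of_ne_nil hne with ⟨x, xs, hx⟩
        rw [hx]
        simp
      · have hf : [(t : Int)].filter (fun i => A i == v) = [] := by simp [hv]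
        rw [hf, List.append_nil]
    · -- fresh key: insert
      have hnone : d.get? (A (t : Int)) = none := by
        rw [PySem.Dict.get?_eq_none_iff_contains]
        exact (Bool.not_eq_true _).mp hc
      have hfilt : (PySem.List.pyRange 0 (t : Int) 1).filter (fun i => A i == A (t : Int)) = [] := by
        rw [← List.head?_eq_none_iff]
        rw [← ih (A (t : Int))]
        exact hnone
      rw [if_pos (Or.inl (by simp [hc]))]
      by_cases hv : A (t : Int) = v
      · subst hv
        rw [PySem.Dict.get?_insert_self d (A (t:Int)) (t:Int), hfilt]
        simp
      · rw [PySem.Dict.get?_insert_of_ne d (t:Int) (fun h => hv h.symm), ih v]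
        have : [(t : Int)].filter (fun i => A i == v) = [] := by simp [hv]
        rw [this, List.append_nil]

-- head? of a filtered strictly sorted range: membership and minimality
lemma pv_first_mem {A : Int → Int} {a b v i0 : Int}
    (h : ((PySem.List.pyRange a b 1).filter (fun i => A i == v)).head? = some i0) :
    (a ≤ i0 ∧ i0 < b) ∧ A i0 = v := by
  have hm : i0 ∈ (PySem.List.pyRange a b 1).filter (fun i => A i == v) :=
    List.mem_of_mem_head? (by rw [h]; rfl)
  have h1 := List.mem_of_mem_filter hm
  have h2 := List.of_mem_filter hm
  exact ⟨(PySem.List.mem_pyRange_one).mp h1, by simpa using h2⟩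

lemma pv_first_min {A : Int → Int} {a b v i0 : Int}
    (h : ((PySem.List.pyRange a b 1).filter (fun i => A i == v)).head? = some i0)
    {i : Int} (hi : i ∈ PySem.List.pyRange a b 1) (hAi : A i = v) : i0 ≤ i := by
  have hp : ((PySem.List.pyRange a b 1).filter (fun i => A i == v)).Pairwise (· < ·) :=
    (PySem.List.pairwise_lt_pyRange_one a b).filter _
  have hm : i ∈ (PySem.List.pyRange a b 1).filter (fun i => A i == v) :=
    List.mem_filter.mpr ⟨hi, by simpa using hAi⟩
  rcases hl : (PySem.List.pyRange a b 1).filter (fun i => A i == v) with _ | ⟨x, xs⟩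
  · rw [hl] at hm; simp at hm
  · rw [hl] at h hm hp
    simp only [List.head?_cons, Option.some_inj] at h
    subst h
    rcases List.mem_cons.mp hm with h | h
    · omega
    · exact le_of_lt ((List.pairwise_cons.mp hp).1 i h)

lemma pv_first_isSome {A : Int → Int} {a b v i : Int}
    (hi : i ∈ PySem.List.pyRange a b 1) (hAi : A i = v) :
    ∃ i0, ((PySem.List.pyRange a b 1).filter (fun i => A i == v)).head? = some i0 := by
  have hm : i ∈ (PySem.List.pyRange a b 1).filter (fun i => A i == v) :=
    List.mem_filter.mpr ⟨hi, by simpa using hAi⟩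
  rcases hl : (PySem.List.pyRange a b 1).filter (fun i => A i == v) with _ | ⟨x, xs⟩
  · rw [hl] at hm; simp at hm
  · exact ⟨x, rfl⟩

-- the min-tracking loop: bounds and attainment
lemma pv_foldl_min {α : Type} (C : α → Prop) [DecidablePred C] (w : α → Int) :
    ∀ (l : List α) (init : Int),
      (l.foldl (fun acc x => if C x ∧ w x < acc then w x else acc) init ≤ init) ∧
      (∀ x ∈ l, C x → l.foldl (fun acc x => if C x ∧ w x < acc then w x else acc) init ≤ w x) ∧
      (l.foldl (fun acc x => if C x ∧ w x < acc then w x else acc) init = init ∨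
        ∃ x ∈ l, C x ∧ l.foldl (fun acc x => if C x ∧ w x < acc then w x else acc) init = w x) := by
  intro l
  induction l with
  | nil => intro init; refine ⟨le_refl _, by simp, Or.inl rfl⟩
  | cons x xs ih =>
    intro init
    simp only [List.foldl_cons]
    set init' := if C x ∧ w x < init then w x else init with hi'
    have hle : init' ≤ init := by rw [hi']; split <;> omega
    obtain ⟨h1, h2, h3⟩ := ih init'
    refine ⟨le_trans h1 hle, ?_, ?_⟩
    · intro y hy hCy
      rcases List.mem_cons.mp hy with rfl | hy'
      · by_cases hlt : w y < init
        · have : init' = w y := by rw [hi', if_pos ⟨hCy, hlt⟩]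
          rw [← this]; exact h1
        · have : init' ≤ w y := by rw [hi']; split <;> omega
          exact le_trans h1 this
      · exact h2 y hy' hCy
    · rcases h3 with h | ⟨y, hy, hCy, hw⟩
      · by_cases hc : C x ∧ w x < init
        · exact Or.inr ⟨x, List.mem_cons_self, hc.1, h.trans (by rw [hi', if_pos hc])⟩
        · exact Or.inl (h.trans (by rw [hi', if_neg hc]))
      · exact Or.inr ⟨y, List.mem_cons_of_mem _ hy, hCy, hw⟩

-- a nested fold over two ranges is a fold over the pair list
lemma pv_foldl_nested {α β : Type} (F : Int → α → β → Int) (js : List β) :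
    ∀ (is : List α) (init : Int),
      is.foldl (fun acc i => js.foldl (fun acc j => F acc i j) acc) init
        = (is.flatMap (fun i => js.map (Prod.mk i))).foldl (fun acc p => F acc p.1 p.2) init := by
  intro is
  induction is with
  | nil => intro init; simp
  | cons i it ih =>
    intro init
    simp only [List.foldl_cons, List.flatMap_cons, List.foldl_append]
    rw [ih, List.foldl_map]

-- B's materialized bit list is the bits of the first n characters
lemma pv_ones_list (d : String) (n : Int) (_h0 : 0 ≤ n) (hn : n ≤ PySem.Str.len d) :
    (PySem.List.pyRange 0 n 1).map (fun k => if PySem.Str.pyGet? d k = some '1' then (1 : Int) else 0)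
      = (d.toList.take n.toNat).map (fun c => if (c == '1') = true then (1 : Int) else 0) := by
  have hlen : ((d.toList.length : Nat) : Int) = PySem.Str.len d := by simp [PySem.Str.len_eq]
  apply List.ext_getElem
  · have hll : ((d.length : Nat) : Int) = PySem.Str.len d := by simp [PySem.Str.len_eq]
    simp [PySem.List.length_pyRange_one]
    omega
  · intro p hp1 hp2
    have hpn : p < n.toNat := by
      simpa [PySem.List.length_pyRange_one] using hp1
    have hplen : p < d.toList.length := by omega
    rw [List.getElem_map, List.getElem_map, PySem.List.getElem_pyRange_one]
    have hget : PySem.Str.pyGet? d ((0 : Int) + (p : Int)) = some d.toList[p] := by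
      simp [PySem.Str.pyGet?]
    rw [hget, List.getElem_take]
    by_cases h : d.toList[p] = '1' <;> simp [h]

-- sum over a 0/1 bit list prefix is a count of '1's
lemma pv_bits_sum (l : List Char) :
    ((l.map (fun c => if (c == '1') = true then (1 : Int) else 0)).sum) = ((l.count '1' : Nat) : Int) := by
  rw [PySem.List.sum_map_ite_one_zero (fun c => c == '1') l]
  rfl

-- B's per-i quantity is a(i)
lemma pv_a_expr (d1 : String) (n i : Int) (_h0 : 0 ≤ i) (hi : i ≤ n) (h0n : 0 ≤ n)
    (h1 : n ≤ PySem.Str.len d1) :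
    2 * (PySem.List.slice
          ((PySem.List.pyRange 0 n 1).map
            (fun k => if PySem.Str.pyGet? d1 k = some '1' then (1 : Int) else 0))
          none (some (n - i))).sum + i
      = pvAval d1.toList n i := by
  rw [pv_ones_list d1 n h0n h1,
      PySem.List.slice_to _ (by omega : (0:Int) ≤ n - i), ← List.map_take,
      List.take_take, min_eq_left (by omega : (n - i).toNat ≤ n.toNat), pv_bits_sum]
  rfl

-- B's per-j quantity is b(j)
lemma pv_b_expr (d2 : String) (n j : Int) (h0 : 0 ≤ j) (hj : j ≤ n)
    (h2 : n ≤ PySem.Str.len d2) :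
    2 * (PySem.List.slice
          ((PySem.List.pyRange 0 n 1).map
            (fun k => if PySem.Str.pyGet? d2 k = some '1' then (1 : Int) else 0))
          (some j) none).sum + j
      = pvBval d2.toList n j := by
  rw [pv_ones_list d2 n (by omega) h2,
      PySem.List.slice_from _ h0, ← List.map_drop, pv_bits_sum]
  have hjn : j.toNat ≤ n.toNat := by omega
  have hcnt : (d2.toList.take n.toNat).count '1'
      = (d2.toList.take j.toNat).count '1' + ((d2.toList.take n.toNat).drop j.toNat).count '1' := by
    conv_lhs => rw [← List.take_append_drop j.toNat (d2.toList.take n.toNat)]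
    rw [List.count_append, List.take_take, min_eq_left hjn]
  unfold pvBval pvOnes
  push_cast [hcnt]
  ring

-- A's hashmap lookup is pvFirst
lemma pv_loop2_get? (n : Int) (d1 : String) (h0 : 0 ≤ n)
    (p1 : List Int)
    (hp1 : ∀ k : Nat, k ≤ n.toNat → PySem.List.pyGetD p1 (k : Int) 0 = pvOnes d1.toList k)
    (v : Int) :
    (pvLoop2 n p1).get? v = pvFirst d1.toList n v := by
  have hups : (n + 1 : Int) = ((n.toNat + 1 : Nat) : Int) := by omega
  have h := pv_dict_get? (fun i => 2 * PySem.List.pyGetD p1 (n - i) 0 + i) (n.toNat + 1) v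
  unfold pvLoop2 pvFirst
  rw [hups]
  refine h.trans ?_
  apply congrArg List.head?
  apply List.filter_congr
  intro i hi
  have hib := (PySem.List.mem_pyRange_one).mp hi
  have hcast : (n - i : Int) = (((n - i).toNat : Nat) : Int) := by omega
  have : PySem.List.pyGetD p1 (n - i) 0 = pvOnes d1.toList (n - i).toNat := by
    rw [hcast]
    exact hp1 (n - i).toNat (by omega)
  simp only [this]
  rfl

-- A in canonical min-tracking form
lemma pv_A_canon (n : Int) (d1 d2 : String) (h0 : 0 ≤ n)
    (h1 : n ≤ PySem.Str.len d1) (h2 : n ≤ PySem.Str.len d2) :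
    minOperationsToUnbias n d1 d2
      = (PySem.List.pyRange 0 (n + 1) 1).foldl
          (fun ans j =>
            if ((pvFirst d1.toList n (2 * n - pvBval d2.toList n j)).isSome = true)
                ∧ (pvFirst d1.toList n (2 * n - pvBval d2.toList n j)).getD 0 + j < ans
            then (pvFirst d1.toList n (2 * n - pvBval d2.toList n j)).getD 0 + j else ans)
          (2 * n) := by
  show pvLoop3 n (PySem.List.pyGetD (pvLoop1 d1 d2 n).2 n 0) (pvLoop1 d1 d2 n).2
        (pvLoop2 n (pvLoop1 d1 d2 n).1) = _
  set N := n.toNat with hNdef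
  have hN : ((N : Nat) : Int) = n := Int.toNat_of_nonneg h0
  have hrange : PySem.List.pyRange 0 n 1 = PySem.List.pyRange 0 ((N : Nat) : Int) 1 := by rw [hN]
  have hrep : (n + 1).toNat = N + 1 := by omega
  have hp1 : (pvLoop1 d1 d2 n).1
      = (PySem.List.pyRange 0 ((N : Nat) : Int) 1).foldl (pvStep d1) (List.replicate (N + 1) (0 : Int)) := by
    unfold pvLoop1
    rw [hrange, hrep]
    exact congrArg Prod.fst (PySem.List.foldl_prod_mk (pvStep d1) (pvStep d2) _ _ _)
  have hp2 : (pvLoop1 d1 d2 n).2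
      = (PySem.List.pyRange 0 ((N : Nat) : Int) 1).foldl (pvStep d2) (List.replicate (N + 1) (0 : Int)) := by
    unfold pvLoop1
    rw [hrange, hrep]
    exact congrArg Prod.snd (PySem.List.foldl_prod_mk (pvStep d1) (pvStep d2) _ _ _)
  have hget1 : ∀ k : Nat, k ≤ N →
      PySem.List.pyGetD ((pvLoop1 d1 d2 n).1) (k : Int) 0 = pvOnes d1.toList k := by
    intro k hk
    rw [hp1]
    exact (pv_prefix d1 N (by rw [hN]; exact h1) N le_rfl).2 k hk
  have hget2 : ∀ k : Nat, k ≤ N →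
      PySem.List.pyGetD ((pvLoop1 d1 d2 n).2) (k : Int) 0 = pvOnes d2.toList k := by
    intro k hk
    rw [hp2]
    exact (pv_prefix d2 N (by rw [hN]; exact h2) N le_rfl).2 k hk
  unfold pvLoop3
  apply PySem.List.foldl_congr_mem
  intro ans j hj
  have hjb := (PySem.List.mem_pyRange_one).mp hj
  have hones2 : PySem.List.pyGetD ((pvLoop1 d1 d2 n).2) n 0 = pvOnes d2.toList N := by
    have h := hget2 N le_rfl; rwa [hN] at h
  have hgj : PySem.List.pyGetD ((pvLoop1 d1 d2 n).2) j 0 = pvOnes d2.toList j.toNat := by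
    rw [show (j : Int) = ((j.toNat : Nat) : Int) from by omega]
    exact hget2 j.toNat (by omega)
  have hb : 2 * (PySem.List.pyGetD ((pvLoop1 d1 d2 n).2) n 0
        - PySem.List.pyGetD ((pvLoop1 d1 d2 n).2) j 0) + j = pvBval d2.toList n j := by
    rw [hones2, hgj]; rfl
  have hlook := pv_loop2_get? n d1 h0 ((pvLoop1 d1 d2 n).1) (fun k hk => hget1 k hk)
      (2 * n - (2 * (PySem.List.pyGetD ((pvLoop1 d1 d2 n).2) n 0
        - PySem.List.pyGetD ((pvLoop1 d1 d2 n).2) j 0) + j))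
  show (match (pvLoop2 n ((pvLoop1 d1 d2 n).1)).get? _ with
        | some i => if i + j < ans then i + j else ans
        | none => ans) = _
  rw [hlook, hb]
  rcases hfst : pvFirst d1.toList n (2 * n - pvBval d2.toList n j) with _ | i
  · simp
  · simp only [Option.isSome_some, Option.getD_some]
    by_cases hlt : i + j < ans
    · rw [if_pos hlt, if_pos ⟨trivial, hlt⟩]
    · rw [if_neg hlt, if_neg (by tauto)]

-- B in canonical min-tracking form over the pair list
lemma pv_B_canon (n : Int) (d1 d2 : String) (h0 : 0 ≤ n)
    (h1 : n ≤ PySem.Str.len d1) (h2 : n ≤ PySem.Str.len d2) :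
    minOperationsToUnbias_alt n d1 d2
      = ((PySem.List.pyRange 0 (n + 1) 1).flatMap
            (fun i => (PySem.List.pyRange 0 (n + 1) 1).map (Prod.mk i))).foldl
          (fun acc (p : Int × Int) =>
            if (pvAval d1.toList n p.1 + pvBval d2.toList n p.2 = 2 * n) ∧ p.1 + p.2 < acc
            then p.1 + p.2 else acc)
          (2 * n) := by
  unfold minOperationsToUnbias_alt
  refine (pv_foldl_nested
      (fun acc i j =>
        if 2 * (PySem.List.slice
              ((PySem.List.pyRange 0 n 1).map
                (fun k => if PySem.Str.pyGet? d1 k = some '1' then (1 : Int) else 0))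
              none (some (n - i))).sum + i
            + (2 * (PySem.List.slice
              ((PySem.List.pyRange 0 n 1).map
                (fun k => if PySem.Str.pyGet? d2 k = some '1' then (1 : Int) else 0))
              (some j) none).sum + j)
            = 2 * n ∧ i + j < acc
        then i + j else acc)
      (PySem.List.pyRange 0 (n + 1) 1) (PySem.List.pyRange 0 (n + 1) 1) (2 * n)).trans ?_
  apply PySem.List.foldl_congr_mem
  intro acc p hp
  rcases List.mem_flatMap.mp hp with ⟨i, hi, hpi⟩
  rcases List.mem_map.mp hpi with ⟨j, hjm, rfl⟩
  have hib := (PySem.List.mem_pyRange_one).mp hi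
  have hjb := (PySem.List.mem_pyRange_one).mp hjm
  rw [pv_a_expr d1 n i (by omega) (by omega) h0 h1, pv_b_expr d2 n j (by omega) (by omega) h2]

-- ===== VERDICT (by name: the statement is the Claim_ definition above) =====
theorem minOperationsToUnbias_spec : Claim_equal_minOperationsToUnbias := by
  intro n d1 d2 _ hpre
  obtain ⟨h0, h1, h2⟩ := hpre
  unfold Spec_minOperationsToUnbias
  rw [pv_A_canon n d1 d2 h0 h1 h2, pv_B_canon n d1 d2 h0 h1 h2]
  obtain ⟨hA1, hA2, hA3⟩ := pv_foldl_min
    (fun j => (pvFirst d1.toList n (2 * n - pvBval d2.toList n j)).isSome = true)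
    (fun j => (pvFirst d1.toList n (2 * n - pvBval d2.toList n j)).getD 0 + j)
    (PySem.List.pyRange 0 (n + 1) 1) (2 * n)
  obtain ⟨hB1, hB2, hB3⟩ := pv_foldl_min
    (fun p : Int × Int => pvAval d1.toList n p.1 + pvBval d2.toList n p.2 = 2 * n)
    (fun p : Int × Int => p.1 + p.2)
    ((PySem.List.pyRange 0 (n + 1) 1).flatMap
      (fun i => (PySem.List.pyRange 0 (n + 1) 1).map (Prod.mk i)))
    (2 * n)
  refine le_antisymm ?_ ?_
  · -- A's result ≤ B's result
    rcases hB3 with hEq | ⟨p, hpmem, hCp, hw⟩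
    · exact le_of_le_of_eq hA1 hEq.symm
    · rcases List.mem_flatMap.mp hpmem with ⟨i, hi, hpi⟩
      rcases List.mem_map.mp hpi with ⟨j, hjm, rfl⟩
      simp only at hCp hw
      have hAv : pvAval d1.toList n i = 2 * n - pvBval d2.toList n j := by omega
      obtain ⟨i0, hi0⟩ := pv_first_isSome (A := pvAval d1.toList n)
        (v := 2 * n - pvBval d2.toList n j) hi hAv
      have hi0' : pvFirst d1.toList n (2 * n - pvBval d2.toList n j) = some i0 := hi0
      have hCA : (pvFirst d1.toList n (2 * n - pvBval d2.toList n j)).isSome = true := by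
        rw [hi0']; rfl
      have hle := hA2 j hjm hCA
      have hmin : i0 ≤ i := pv_first_min hi0 hi hAv
      rw [hw]
      calc _ ≤ (pvFirst d1.toList n (2 * n - pvBval d2.toList n j)).getD 0 + j := hle
        _ = i0 + j := by rw [hi0']; rfl
        _ ≤ i + j := by omega
  · -- B's result ≤ A's result
    rcases hA3 with hEq | ⟨j, hjm, hCj, hw⟩
    · exact le_of_le_of_eq hB1 hEq.symm
    · obtain ⟨i0, hi0⟩ := Option.isSome_iff_exists.mp hCj
      obtain ⟨hi0b, hi0A⟩ := pv_first_mem (A := pvAval d1.toList n) hi0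
      have hjb := (PySem.List.mem_pyRange_one).mp hjm
      have hpmem : (i0, j) ∈ (PySem.List.pyRange 0 (n + 1) 1).flatMap
          (fun i => (PySem.List.pyRange 0 (n + 1) 1).map (Prod.mk i)) :=
        List.mem_flatMap.mpr ⟨i0, (PySem.List.mem_pyRange_one).mpr ⟨hi0b.1, hi0b.2⟩,
          List.mem_map.mpr ⟨j, hjm, rfl⟩⟩
      have hCB : pvAval d1.toList n i0 + pvBval d2.toList n j = 2 * n := by omega
      have hle := hB2 (i0, j) hpmem hCB
      rw [hw]
      have : (pvFirst d1.toList n (2 * n - pvBval d2.toList n j)).getD 0 = i0 := by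
        have hi0' : pvFirst d1.toList n (2 * n - pvBval d2.toList n j) = some i0 := hi0
        rw [hi0']; rfl
      rw [this]
      exact hle
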